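-- pv_equiv track=rewrite | github.com/JamesQAQ/Coding-Practices | LeetCode/Easy/2269. Find the K-Beauty of a Number/2026-04-27_Accepted.py | divisorSubstrings
-- ===== SOURCE A (Python) =====
-- def divisorSubstrings(num: int, k: int) -> int:
--   ans = 0
--   num_str = str(num)
--   for i in range(0, len(num_str) - k + 1):
--     divisor = int(num_str[i : i + k])
--     if divisor != 0 and num % divisor == 0:
--       ans += 1
--   return ans
-- ===== SOURCE B (Python) =====
-- def _scan(num, window, rest):
--     d = int(window)
--     hit = 1 if d != 0 and num % d == 0 else 0
--     if not rest:
--         return hit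
--     return hit + _scan(num, window[1:] + rest[0], rest[1:])
--
--
-- def divisorSubstrings(num: int, k: int) -> int:
--     s = str(num)
--     if len(s) < k:
--         return 0
--     return _scan(num, s[:k], s[k:])
-- ===== Notes on version B (the rewrite author's own statement) =====
-- stated objective: alternative
-- what changed: Replaces the index loop that re-slices num_str[i:i+k] for every i by a recursive rolling scan that maintains the current k-character window explicitly (drop first char, append next) and consumes the rest of the string, with no indices or range bound computation.
import Mathlib
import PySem

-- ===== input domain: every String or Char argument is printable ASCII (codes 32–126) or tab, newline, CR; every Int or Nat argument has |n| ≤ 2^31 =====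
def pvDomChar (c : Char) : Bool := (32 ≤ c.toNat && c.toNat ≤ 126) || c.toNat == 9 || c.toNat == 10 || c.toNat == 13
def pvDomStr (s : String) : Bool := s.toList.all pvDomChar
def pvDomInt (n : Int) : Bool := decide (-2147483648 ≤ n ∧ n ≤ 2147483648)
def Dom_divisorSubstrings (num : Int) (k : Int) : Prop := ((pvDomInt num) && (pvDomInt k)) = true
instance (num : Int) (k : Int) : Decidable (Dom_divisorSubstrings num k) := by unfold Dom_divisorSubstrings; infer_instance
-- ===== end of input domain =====

-- B replaces A's index loop (re-slicing num_str[i:i+k] at every i) by a recursive rolling scan that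
-- maintains the k-character window explicitly (drop first char, append next char); same cost, different structure.

-- ===== PORT A =====
def divisorSubstrings (num : Int) (k : Int) : Int :=
  let numStr := PySem.Int.toChars num
  (PySem.List.pyRange 0 ((numStr.length : Int) - k + 1) 1).foldl
    (fun ans i =>
      match PySem.Int.ofChars? (PySem.List.slice numStr (some i) (some (i + k))) with
      | some divisor => if divisor ≠ 0 ∧ PySem.Int.mod num divisor = 0 then ans + 1 else ans
      | none => ans)  -- int('') / int('-'): ValueError; Pre_ excludes these inputs
    0

-- ===== PORT B =====
def scanGo (num : Int) (window : List Char) (rest : List Char) : Int :=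
  let hit : Int :=
    match PySem.Int.ofChars? window with   -- d = int(window); none = ValueError, excluded by Pre_
    | some d => if d ≠ 0 ∧ PySem.Int.mod num d = 0 then 1 else 0
    | none => 0
  match rest with
  | [] => hit
  | c :: rest' => hit + scanGo num (PySem.List.slice window (some 1) none ++ [c]) rest'

def divisorSubstrings_alt (num : Int) (k : Int) : Int :=
  let s := PySem.Int.toChars num
  if (s.length : Int) < k then 0
  else scanGo num (PySem.List.slice s none (some k)) (PySem.List.slice s (some k) none)

-- ===== PRECONDITION & SPEC =====
-- Exactly the inputs on which the Python A returns: for k ≤ 0 the first window num_str[0:k] is '' and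
-- int('') raises ValueError; for num < 0 and k = 1 the first window is '-' and int('-') raises ValueError.
def Pre_divisorSubstrings (num : Int) (k : Int) : Prop := 1 ≤ k ∧ (0 ≤ num ∨ 2 ≤ k)
instance (num : Int) (k : Int) : Decidable (Pre_divisorSubstrings num k) := by unfold Pre_divisorSubstrings; infer_instance
def pvWitness_divisorSubstrings : Int × Int := (1012, 2)

def Spec_divisorSubstrings (num : Int) (k : Int) (out : Int) : Prop := out = divisorSubstrings_alt num k
instance (num : Int) (k : Int) (out : Int) : Decidable (Spec_divisorSubstrings num k out) := by unfold Spec_divisorSubstrings; infer_instance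

-- ===== CLAIM (what is proved, stated in full; the proofs are below) =====
def Claim_equal_divisorSubstrings : Prop := ∀ (num : Int) (k : Int), Dom_divisorSubstrings num k → Pre_divisorSubstrings num k → Spec_divisorSubstrings num k (divisorSubstrings num k)

-- ===== LEMMAS AND PROOFS =====

-- the per-window contribution both programs add
def pvHit (num : Int) (w : List Char) : Int :=
  match PySem.Int.ofChars? w with
  | some d => if d ≠ 0 ∧ PySem.Int.mod num d = 0 then 1 else 0
  | none => 0

-- shifting the k'-character window one step to the right
lemma window_shift (s : List Char) (j k' : Nat) (hk : 1 ≤ k') (hlt : j + k' < s.length) :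
    ((s.drop j).take k').tail ++ [s[j + k']'hlt] = (s.drop (j+1)).take k' := by
  obtain ⟨m, rfl⟩ : ∃ m, k' = m + 1 := ⟨k' - 1, by omega⟩
  rw [List.drop_eq_getElem_cons (show j < s.length by omega), List.take_succ_cons, List.tail_cons]
  rw [show ((s.drop (j+1)).take (m+1)) = (s.drop (j+1)).take m ++ (s.drop (j+1))[m]?.toList from
      List.take_add_one]
  congr 1
  rw [List.getElem?_drop, List.getElem?_eq_getElem (by omega)]
  simp
  congr 1
  omega

lemma scanGo_nil (num : Int) (w : List Char) : scanGo num w [] = pvHit num w := by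
  simp [scanGo, pvHit]

lemma scanGo_cons (num : Int) (w : List Char) (c : Char) (rest : List Char) :
    scanGo num w (c :: rest) = pvHit num w + scanGo num (w.tail ++ [c]) rest := by
  rw [scanGo, PySem.List.slice_from_one]
  rfl

lemma range_sum_shift (f : Nat → Int) (m : Nat) :
    ((List.range (m+1+1)).map f).sum = f 0 + ((List.range (m+1)).map (fun t => f (t+1))).sum := by
  rw [List.range_succ_eq_map]
  simp only [List.map_cons, List.sum_cons, List.map_map]
  rfl

-- B's rolling scan computes the sum of the per-window hits over all windows from position j on
lemma scan_sum (num : Int) (s : List Char) (k' : Nat) (hk : 1 ≤ k') :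
    ∀ (m j : Nat), j + k' + m = s.length →
      scanGo num ((s.drop j).take k') (s.drop (j + k')) =
        ((List.range (m+1)).map (fun t => pvHit num ((s.drop (j+t)).take k'))).sum := by
  intro m
  induction m with
  | zero =>
    intro j hj
    rw [show s.drop (j + k') = [] from List.drop_eq_nil_of_le (by omega), scanGo_nil]
    simp
  | succ m ih =>
    intro j hj
    have hlt : j + k' < s.length := by omega
    rw [List.drop_eq_getElem_cons hlt, scanGo_cons, window_shift s j k' hk hlt,
        show s.drop (j + k' + 1) = s.drop ((j+1) + k') by rw [show j + k' + 1 = (j+1) + k' by omega],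
        ih (j+1) (by omega)]
    rw [range_sum_shift (fun t => pvHit num (List.take k' (List.drop (j + t) s))) m]
    rw [Nat.add_zero]
    congr 1
    congr 1
    apply List.map_congr_left
    intro t _
    rw [show j + 1 + t = j + (t + 1) by omega]

-- A's indexed fold computes the same sum of per-window hits
lemma a_side (num k : Int) (hk : 1 ≤ k) (hle : k.toNat ≤ (PySem.Int.toChars num).length) :
    divisorSubstrings num k =
      ((List.range ((PySem.Int.toChars num).length - k.toNat + 1)).map
        (fun t => pvHit num (((PySem.Int.toChars num).drop t).take k.toNat))).sum := by
  set s := PySem.Int.toChars num with hs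
  simp only [divisorSubstrings, ← hs]
  rw [PySem.List.pyRange_one, List.foldl_map]
  have hstep : (fun (ans : Int) (t : Nat) =>
      match PySem.Int.ofChars? (PySem.List.slice s (some (0 + (t:Int))) (some (0 + (t:Int) + k))) with
      | some divisor => if divisor ≠ 0 ∧ PySem.Int.mod num divisor = 0 then ans + 1 else ans
      | none => ans)
      = fun (ans : Int) (t : Nat) =>
          ans + pvHit num (PySem.List.slice s (some (0 + (t:Int))) (some (0 + (t:Int) + k))) := by
    funext a t
    simp only [pvHit]
    rcases PySem.Int.ofChars? (PySem.List.slice s (some (0 + (t:Int))) (some (0 + (t:Int) + k))) with _ | d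
    · simp
    · dsimp only
      by_cases hd : d ≠ 0 ∧ PySem.Int.mod num d = 0 <;> simp [hd]
  rw [hstep, PySem.List.foldl_add, zero_add]
  rw [show ((s.length : Int) - k + 1 - 0).toNat = s.length - k.toNat + 1 by omega]
  congr 1
  apply List.map_congr_left
  intro t ht
  rw [List.mem_range] at ht
  congr 1
  rw [show (0 + (t:Int)) = ((t:Nat):Int) by omega]
  rw [PySem.List.slice_toNat s (by omega) (by omega)]
  rw [show (((t:Nat):Int) + k).toNat - ((t:Nat):Int).toNat = k.toNat by omega, Int.toNat_natCast]

-- ===== VERDICT (by name: the statement is the Claim_ definition above) =====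
theorem divisorSubstrings_spec : Claim_equal_divisorSubstrings := by
  intro num k _ hpre
  obtain ⟨hk, -⟩ := hpre
  unfold Spec_divisorSubstrings
  by_cases hlt : ((PySem.Int.toChars num).length : Int) < k
  · simp only [divisorSubstrings, divisorSubstrings_alt]
    rw [if_pos hlt, PySem.List.pyRange_one_eq_nil (by omega)]
    rfl
  · have hle : k.toNat ≤ (PySem.Int.toChars num).length := by omega
    rw [a_side num k hk hle]
    simp only [divisorSubstrings_alt]
    rw [if_neg hlt, PySem.List.slice_to _ (by omega), PySem.List.slice_from _ (by omega)]
    have h := scan_sum num (PySem.Int.toChars num) k.toNat (by omega)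
      ((PySem.Int.toChars num).length - k.toNat) 0 (by omega)
    rw [List.drop_zero, Nat.zero_add] at h
    rw [h]
    congr 1
    apply List.map_congr_left
    intro t _
    rw [Nat.zero_add]
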